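-- pv_equiv track=rewrite | github.com/wendyrvllr/Dicom-To-CNN | library_dicom/dicom_processor/tools/rt_processor/DVH_data.py | generate_x_y_cumul
-- ===== SOURCE A (Python) =====
-- def generate_x_y_cumul(liste):
--     x = []
--     y = []
--     somme = 0
--     for i in range(len(liste)) :
--         if i%2 == 1 :
--             y.append(liste[i])
--         else :
--             somme += liste[i]
--             x.append(somme)
--     return x,y
-- ===== SOURCE B (Python) =====
-- def generate_x_y_cumul(liste):
--     x = []
--     total = 0
--     for v in liste[::2]:
--         total += v
--         x.append(total)
--     return x, liste[1::2]
-- ===== Notes on version B (the rewrite author's own statement) =====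
-- stated objective: idiomatic
-- what changed: Replaces the single index-parity loop (i%2 branch with a manual running sum) by two separate slice passes: a prefix-sum over liste[::2] for x and liste[1::2] for y.
import Mathlib
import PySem

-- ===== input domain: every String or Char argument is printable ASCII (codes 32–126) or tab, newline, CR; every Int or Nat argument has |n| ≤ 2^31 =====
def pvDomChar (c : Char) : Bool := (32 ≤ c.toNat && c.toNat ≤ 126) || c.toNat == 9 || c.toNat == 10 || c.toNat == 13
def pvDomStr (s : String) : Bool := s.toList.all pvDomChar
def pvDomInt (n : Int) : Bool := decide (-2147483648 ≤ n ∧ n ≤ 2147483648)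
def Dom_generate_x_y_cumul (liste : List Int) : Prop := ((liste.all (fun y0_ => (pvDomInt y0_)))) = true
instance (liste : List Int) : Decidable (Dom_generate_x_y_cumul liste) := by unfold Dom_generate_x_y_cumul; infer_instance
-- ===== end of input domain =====

-- B replaces A's single index-parity loop by two slice passes (prefix-sum over liste[::2], and liste[1::2]); objective: idiomatic.


-- ===== PORT A =====
-- 'for i in range(len(liste)): … liste[i] …' ported as a fold over enumerate (index, value) pairs,
-- same state (x, y, somme), same branch order; i % 2 is Python's % (PySem.Int.mod).
def generate_x_y_cumul (liste : List Int) : List Int × List Int :=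
  let st := (PySem.List.enumerate liste 0).foldl
    (fun (st : List Int × List Int × Int) (p : Int × Int) =>
      if PySem.Int.mod p.1 2 == 1 then (st.1, st.2.1 ++ [p.2], st.2.2)
      else (st.1 ++ [st.2.2 + p.2], st.2.1, st.2.2 + p.2))
    ([], [], 0)
  (st.1, st.2.1)

-- ===== PORT B =====
-- liste[::2] and liste[1::2] are PySem.List.slice? with step 2 (step ≠ 0, so never none);
-- then a prefix-sum loop over the even-indexed slice.
def generate_x_y_cumul_alt (liste : List Int) : List Int × List Int :=
  let evens := (PySem.List.slice? liste none none 2).getD []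
  let st := evens.foldl (fun (p : List Int × Int) v => (p.1 ++ [p.2 + v], p.2 + v)) ([], 0)
  (st.1, (PySem.List.slice? liste (some 1) none 2).getD [])

-- ===== PRECONDITION & SPEC =====
def Spec_generate_x_y_cumul (liste : List Int) (out : List Int × List Int) : Prop := out = generate_x_y_cumul_alt liste
instance (liste : List Int) (out : List Int × List Int) : Decidable (Spec_generate_x_y_cumul liste out) := by unfold Spec_generate_x_y_cumul; infer_instance

-- ===== CLAIM (what is proved, stated in full; the proofs are below) =====
def Claim_equal_generate_x_y_cumul : Prop := ∀ (liste : List Int), Dom_generate_x_y_cumul liste → Spec_generate_x_y_cumul liste (generate_x_y_cumul liste)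

-- ===== LEMMAS AND PROOFS =====

-- even-indexed elements of a list (the value of xs[::2])
def pvEvens {α : Type} : List α → List α
  | [] => []
  | [a] => [a]
  | a :: _ :: t => a :: pvEvens t

-- running prefix sums starting from s, together with the final total
def pvScan : List Int → Int → List Int × Int
  | [], s => ([], s)
  | v :: t, s => ((s + v) :: (pvScan t (s + v)).1, (pvScan t (s + v)).2)

lemma pvEvens_slice : ∀ (xs : List Int), PySem.List.slice? xs none none 2 = some (pvEvens xs) := by
  intro xs
  induction xs using pvEvens.induct with
  | case1 => decide
  | case2 a => simp [PySem.List.slice?, PySem.List.sliceIndices, pvEvens]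
  | case3 a b t ih =>
    simp only [PySem.List.slice?, PySem.List.sliceIndices] at ih ⊢
    norm_num at ih ⊢
    have hn : (if 0 ≤ (t.length:Int) + 1 then (((t.length:Int) + 1 + 1 + 2 - 1) / 2).toNat else 0)
        = (if 0 < t.length then (((t.length:Int) + 2 - 1) / 2).toNat else 0) + 1 := by
      split_ifs <;> omega
    rw [hn, List.range_succ_eq_map, List.filterMap_cons, List.filterMap_map]
    have hfun : ∀ k ∈ List.range (if 0 < t.length then (((t.length:Int) + 2 - 1) / 2).toNat else 0),
        ((fun (x:Nat) => (a :: b :: t)[(2 * (x:Int)).toNat]?) ∘ Nat.succ) k = (fun (x:Nat) => t[(2 * (x:Int)).toNat]?) k := by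
      intro k _
      have h2 : (2 * ((k:Int) + 1)).toNat = (2 * (k:Int)).toNat + 1 + 1 := by omega
      simp [Function.comp, h2]
    rw [List.filterMap_congr hfun, ih]
    norm_num [pvEvens]

lemma pvOdds_slice : ∀ (xs : List Int), PySem.List.slice? xs (some 1) none 2 = some (pvEvens xs.tail) := by
  intro xs
  cases xs with
  | nil => decide
  | cons a t =>
    have h1 := pvEvens_slice t
    simp only [PySem.List.slice?, PySem.List.sliceIndices] at h1 ⊢
    norm_num at h1 ⊢
    rw [← h1]
    apply List.filterMap_congr
    intro k _
    have h2 : (1 + 2 * (k:Int)).toNat = (2 * (k:Int)).toNat + 1 := by omega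
    simp only [h2, List.getElem?_cons_succ]

lemma pvEvens_cons_tail {α : Type} (b : α) (t : List α) :
    pvEvens (b :: t) = b :: pvEvens t.tail := by
  cases t <;> simp [pvEvens]

-- B's prefix-sum fold computes pvScan
lemma foldl_pvScan : ∀ (l : List Int) (acc : List Int) (s : Int),
    l.foldl (fun (p : List Int × Int) v => (p.1 ++ [p.2 + v], p.2 + v)) (acc, s)
      = (acc ++ (pvScan l s).1, (pvScan l s).2) := by
  intro l
  induction l with
  | nil => intro acc s; simp [pvScan]
  | cons v t ih => intro acc s; simp [List.foldl_cons, pvScan, ih, List.append_assoc]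

-- A's loop invariant: starting at an even index s, the fold extends x by the prefix sums of the
-- even-position elements and y by the odd-position elements.
lemma foldl_A : ∀ (t : List Int) (s : Int) (x y : List Int) (somme : Int), s % 2 = 0 →
    (PySem.List.enumerate t s).foldl
      (fun (st : List Int × List Int × Int) (p : Int × Int) =>
        if PySem.Int.mod p.1 2 == 1 then (st.1, st.2.1 ++ [p.2], st.2.2)
        else (st.1 ++ [st.2.2 + p.2], st.2.1, st.2.2 + p.2))
      (x, y, somme)
      = (x ++ (pvScan (pvEvens t) somme).1, y ++ pvEvens t.tail, (pvScan (pvEvens t) somme).2) := by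
  intro t
  induction t using pvEvens.induct with
  | case1 => intro s x y somme _; simp [PySem.List.enumerate_nil, pvEvens, pvScan]
  | case2 a =>
    intro s x y somme hs
    have hm0 : PySem.Int.mod s 2 = 0 := by
      unfold PySem.Int.mod; rw [Int.fmod_eq_emod]; omega
    have hmb : (PySem.Int.mod s 2 == 1) = false := by rw [hm0]; rfl
    rw [PySem.List.enumerate_cons]
    simp only [List.foldl_cons, hmb, Bool.false_eq_true, if_false,
      PySem.List.enumerate_nil, List.foldl_nil]
    simp [pvEvens, pvScan]
  | case3 a b t' ih =>
    intro s x y somme hs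
    have hm0 : PySem.Int.mod s 2 = 0 := by
      unfold PySem.Int.mod; rw [Int.fmod_eq_emod]; omega
    have hm1 : PySem.Int.mod (s + 1) 2 = 1 := by
      unfold PySem.Int.mod; rw [Int.fmod_eq_emod]; omega
    have hmb : (PySem.Int.mod s 2 == 1) = false := by rw [hm0]; rfl
    have hmb1 : (PySem.Int.mod (s + 1) 2 == 1) = true := by rw [hm1]; rfl
    have hs2 : (s + 1 + 1) % 2 = 0 := by omega
    rw [PySem.List.enumerate_cons, PySem.List.enumerate_cons]
    simp only [List.foldl_cons, hmb, hmb1, Bool.false_eq_true, if_false, if_true]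
    rw [ih (s + 1 + 1) (x ++ [somme + a]) (y ++ [b]) (somme + a) hs2]
    simp [pvEvens, pvScan, pvEvens_cons_tail, List.append_assoc]

-- ===== VERDICT (by name: the statement is the Claim_ definition above) =====
theorem generate_x_y_cumul_spec : Claim_equal_generate_x_y_cumul := by
  intro liste _
  unfold Spec_generate_x_y_cumul generate_x_y_cumul generate_x_y_cumul_alt
  rw [pvEvens_slice, pvOdds_slice]
  simp only [Option.getD_some]
  rw [foldl_A liste 0 [] [] 0 (by decide), foldl_pvScan]
  simp
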